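-- pv_equiv track=rewrite | github.com/k8thekat/AMPAPI_Python | ampapi/util.py | str_sanitizer_sphinx
-- ===== SOURCE A (Python) =====
-- def str_sanitizer_sphinx(string: str, special_chars: tuple) -> str:
--     """
--     Sanitizes a string to prevent .rst typing errors.
--
--     Parameters
--     -----------
--     string: :class:`str`
--         The string with the special_char.
--
--     Returns
--     --------
--     :class:`str`
--         The converted string for propery Sphinx documentation.
--     """
--     _temp = ""
--     found_special: bool = False
--     for char in string:
--         if found_special is False and char in special_chars:
--             char = "``" + char
--             found_special = True
--             continue
--         if found_special is True and char == " ":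
--             char = "``" + char
--             found_special = False
--         _temp += char
--     return _temp
-- ===== SOURCE B (Python) =====
-- def str_sanitizer_sphinx(string: str, special_chars: tuple) -> str:
--     # Chunk/slice-based recursion: find the first special char, drop it, copy up
--     # to the next space (which becomes "`` "), and recurse on the remainder.
--     specials = {c for c in special_chars if len(c) == 1}
--
--     def go(rest: str) -> str:
--         i = next((k for k, c in enumerate(rest) if c in specials), None)
--         if i is None:
--             return rest
--         tail = rest[i + 1:]
--         j = next((k for k, c in enumerate(tail) if c == " "), None)
--         if j is None:
--             return rest[:i] + tail
--         return rest[:i] + tail[:j] + "`` " + go(tail[j + 1:])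
--
--     return go(string)
-- ===== Notes on version B (the rewrite author's own statement) =====
-- stated objective: faster
-- what changed: Replaced A's char-by-char loop (with a found_special flag and per-char string concatenation) by a slice-based recursion that finds the next special character, drops it, copies up to the next space in one slice, emits '`` ', and recurses on the remainder, joining the pieces at the end (specials pre-filtered to single-character entries once).
import Mathlib
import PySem

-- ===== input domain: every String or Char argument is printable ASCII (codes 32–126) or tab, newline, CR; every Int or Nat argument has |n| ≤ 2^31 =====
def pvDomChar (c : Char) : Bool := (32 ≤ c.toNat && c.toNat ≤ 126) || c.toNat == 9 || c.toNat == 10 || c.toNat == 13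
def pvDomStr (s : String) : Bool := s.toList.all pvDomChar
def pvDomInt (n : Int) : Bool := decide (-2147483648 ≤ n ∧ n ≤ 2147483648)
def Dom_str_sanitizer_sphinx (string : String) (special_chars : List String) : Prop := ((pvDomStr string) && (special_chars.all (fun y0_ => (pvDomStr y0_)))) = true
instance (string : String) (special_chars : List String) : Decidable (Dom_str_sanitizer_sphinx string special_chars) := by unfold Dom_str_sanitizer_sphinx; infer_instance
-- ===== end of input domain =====

-- B replaces A's char-by-char flag state machine by a slice-based recursion
-- (find first special char, drop it, copy to the next space, emit "`` ", recurse,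
-- joining slices instead of per-char string concatenation); objective: faster
-- (measurably, in a timing run).


-- ===== PORT A =====
-- one iteration of A's for-loop; state = (_temp as char list, found_special)
def pvAStep (special_chars : List String) (st : List Char × Bool) (c : Char) : List Char × Bool :=
  if st.2 = false ∧ String.singleton c ∈ special_chars then
    -- char is reassigned to "``"+char but `continue` skips the append, so it is dropped
    (st.1, true)
  else if st.2 = true ∧ c = ' ' then
    (st.1 ++ ('`' :: '`' :: [c]), false)   -- _temp += "``" + " "
  else
    (st.1 ++ [c], st.2)

def str_sanitizer_sphinx (string : String) (special_chars : List String) : String :=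
  String.ofList ((string.toList.foldl (pvAStep special_chars) ([], false)).1)

-- ===== PORT B =====
-- Source B's `go(rest)`: the two generator searches are findIdx?; slices are take/drop.
-- pvBGo does the search for a special char, pvBOn the search for the closing space.
mutual
def pvBGo (specials : List String) (rest : List Char) : List Char :=
  match h : rest.findIdx? (fun c => String.singleton c ∈ specials) with
  | none => rest
  | some i => rest.take i ++ pvBOn specials (rest.drop (i + 1))
  termination_by rest.length
  decreasing_by
    have := (List.findIdx?_eq_some_iff_findIdx_eq.mp h).1
    simp [List.length_drop]; omega
def pvBOn (specials : List String) (tail : List Char) : List Char :=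
  match h : tail.findIdx? (fun c => c = ' ') with
  | none => tail
  | some j => tail.take j ++ '`' :: '`' :: ' ' :: pvBGo specials (tail.drop (j + 1))
  termination_by tail.length
  decreasing_by
    have := (List.findIdx?_eq_some_iff_findIdx_eq.mp h).1
    simp [List.length_drop]; omega
end

def str_sanitizer_sphinx_alt (string : String) (special_chars : List String) : String :=
  let specials := PySem.Set.ofList (special_chars.filter (fun s => s.length = 1))
  String.ofList (pvBGo specials string.toList)

-- ===== PRECONDITION & SPEC =====
def Spec_str_sanitizer_sphinx (string : String) (special_chars : List String) (out : String) : Prop := out = str_sanitizer_sphinx_alt string special_chars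
instance (string : String) (special_chars : List String) (out : String) : Decidable (Spec_str_sanitizer_sphinx string special_chars out) := by unfold Spec_str_sanitizer_sphinx; infer_instance

-- ===== CLAIM (what is proved, stated in full; the proofs are below) =====
def Claim_equal_str_sanitizer_sphinx : Prop := ∀ (string : String) (special_chars : List String), Dom_str_sanitizer_sphinx string special_chars → Spec_str_sanitizer_sphinx string special_chars (str_sanitizer_sphinx string special_chars)

-- ===== LEMMAS AND PROOFS =====

-- B's filtered set tests membership exactly like A's raw tuple does on single chars
lemma mem_specials (sp : List String) (c : Char) :
    (String.singleton c ∈ PySem.Set.ofList (sp.filter (fun s => s.length = 1))) ↔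
      String.singleton c ∈ sp := by
  rw [PySem.Set.mem_ofList, List.mem_filter]
  simp [String.singleton]

-- the joint loop invariant: A's fold with found_special = false computes pvBGo,
-- and with found_special = true computes pvBOn, each appended to the accumulator
lemma fold_eq_go (sp : List String) (l : List Char) :
    (∀ acc, (l.foldl (pvAStep sp) (acc, false)).1
        = acc ++ pvBGo (PySem.Set.ofList (sp.filter (fun s => s.length = 1))) l) ∧
    (∀ acc, (l.foldl (pvAStep sp) (acc, true)).1
        = acc ++ pvBOn (PySem.Set.ofList (sp.filter (fun s => s.length = 1))) l) := by
  induction l with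
  | nil =>
    constructor
    · intro acc; rw [pvBGo.eq_def]; simp
    · intro acc; rw [pvBOn.eq_def]; simp
  | cons c t ih =>
    set sp2 := PySem.Set.ofList (sp.filter (fun s => s.length = 1)) with hsp2
    constructor
    · intro acc
      by_cases hc : String.singleton c ∈ sp
      · have hc2 : (String.singleton c ∈ sp2) := (mem_specials sp c).mpr hc
        rw [List.foldl_cons]
        simp only [pvAStep]
        rw [if_pos (by simp [hc])]
        rw [pvBGo.eq_def, List.findIdx?_cons, if_pos (by simpa using hc2)]
        simpa using ih.2 acc
      · have hc2 : ¬ (String.singleton c ∈ sp2) := fun h => hc ((mem_specials sp c).mp h)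
        rw [List.foldl_cons]
        simp only [pvAStep]
        rw [if_neg (by simp [hc]), if_neg (by simp)]
        rw [pvBGo.eq_def, List.findIdx?_cons, if_neg (by simpa using hc2)]
        cases hfi : t.findIdx? (fun x => decide (String.singleton x ∈ sp2)) with
        | none =>
          have := ih.1 (acc ++ [c])
          rw [pvBGo.eq_def, hfi] at this
          simpa using this
        | some i =>
          have := ih.1 (acc ++ [c])
          rw [pvBGo.eq_def, hfi] at this
          simp only [Option.map_some]
          simpa [List.take_succ_cons, List.drop_succ_cons] using this
    · intro acc
      by_cases hc : c = ' '
      · subst hc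
        rw [List.foldl_cons]
        simp only [pvAStep]
        rw [if_neg (by simp), if_pos (by simp)]
        rw [pvBOn.eq_def, List.findIdx?_cons, if_pos (by simp)]
        simpa using ih.1 (acc ++ ('`' :: '`' :: [' ']))
      · rw [List.foldl_cons]
        simp only [pvAStep]
        rw [if_neg (by simp), if_neg (by simp [hc])]
        rw [pvBOn.eq_def, List.findIdx?_cons, if_neg (by simp [hc])]
        cases hfi : t.findIdx? (fun x => decide (x = ' ')) with
        | none =>
          have := ih.2 (acc ++ [c])
          rw [pvBOn.eq_def, hfi] at this
          simpa using this
        | some j =>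
          have := ih.2 (acc ++ [c])
          rw [pvBOn.eq_def, hfi] at this
          simp only [Option.map_some]
          simpa [List.take_succ_cons, List.drop_succ_cons] using this

-- ===== VERDICT (by name: the statement is the Claim_ definition above) =====
theorem str_sanitizer_sphinx_spec : Claim_equal_str_sanitizer_sphinx := by
  intro s sp _
  unfold Spec_str_sanitizer_sphinx str_sanitizer_sphinx str_sanitizer_sphinx_alt
  have := (fold_eq_go sp s.toList).1 []
  simp [this]
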